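-- pv_equiv track=rewrite | github.com/vishnuas22/Queen-walk | backend/quantum_intelligence/services/personalization/mood_adaptation.py | _detect_mood_trend
-- ===== SOURCE A (Python) =====
-- from typing import Dict, Any, List, Optional, Tuple
--
-- def _detect_mood_trend(recent_moods: List[Dict[str, Any]]) -> str:
--     """Detect mood trend from recent history"""
--     if len(recent_moods) < 3:
--         return "insufficient_data"
--
--     positive_moods = ["excited", "confident", "curious"]
--     negative_moods = ["frustrated", "tired", "anxious", "bored"]
--
--     # Analyze first half vs second half
--     mid_point = len(recent_moods) // 2
--     first_half = recent_moods[:mid_point]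
--     second_half = recent_moods[mid_point:]
--
--     first_positive = sum(1 for mood in first_half if mood["mood"] in positive_moods)
--     second_positive = sum(1 for mood in second_half if mood["mood"] in positive_moods)
--
--     first_negative = sum(1 for mood in first_half if mood["mood"] in negative_moods)
--     second_negative = sum(1 for mood in second_half if mood["mood"] in negative_moods)
--
--     # Calculate trend
--     positive_trend = second_positive - first_positive
--     negative_trend = second_negative - first_negative
--
--     if positive_trend > 0 and negative_trend <= 0:
--         return "improving"
--     elif negative_trend > 0 and positive_trend <= 0:
--         return "declining"
--     else:
--         return "stable"
-- ===== SOURCE B (Python) =====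
-- def _detect_mood_trend(recent_moods):
--     """Detect mood trend from recent history (single signed-accumulator pass)."""
--     if len(recent_moods) < 3:
--         return "insufficient_data"
--
--     positive_moods = ["excited", "confident", "curious"]
--     negative_moods = ["frustrated", "tired", "anxious", "bored"]
--
--     mid_point = len(recent_moods) // 2
--     positive_trend = 0
--     negative_trend = 0
--     for i, mood in enumerate(recent_moods):
--         m = mood["mood"]
--         sign = 1 if i >= mid_point else -1
--         if m in positive_moods:
--             positive_trend += sign
--         elif m in negative_moods:
--             negative_trend += sign
--
--     if positive_trend > 0 and negative_trend <= 0: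
--         return "improving"
--     elif negative_trend > 0 and positive_trend <= 0:
--         return "declining"
--     else:
--         return "stable"
-- ===== Notes on version B (the rewrite author's own statement) =====
-- stated objective: simpler
-- what changed: Replaces the halving slices and four separate counting comprehensions by one pass over enumerate(recent_moods) with two signed accumulators (+1 past the midpoint, -1 before it).
import Mathlib
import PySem

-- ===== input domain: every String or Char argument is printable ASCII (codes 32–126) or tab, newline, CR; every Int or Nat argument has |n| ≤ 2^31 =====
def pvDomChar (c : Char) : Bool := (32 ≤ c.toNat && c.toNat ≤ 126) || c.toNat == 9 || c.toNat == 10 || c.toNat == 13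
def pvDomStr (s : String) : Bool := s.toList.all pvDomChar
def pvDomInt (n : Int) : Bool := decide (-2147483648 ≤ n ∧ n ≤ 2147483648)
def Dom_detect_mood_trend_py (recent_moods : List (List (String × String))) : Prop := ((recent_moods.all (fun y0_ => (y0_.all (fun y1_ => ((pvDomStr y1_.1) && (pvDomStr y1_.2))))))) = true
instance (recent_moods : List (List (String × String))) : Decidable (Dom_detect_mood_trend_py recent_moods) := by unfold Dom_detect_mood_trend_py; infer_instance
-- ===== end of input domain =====

-- B replaces the two half-slices and four counting comprehensions by one signed-accumulator
-- pass over enumerate(recent_moods); same result, simpler single loop ('simpler', not faster).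

-- ===== PORT A =====
-- mood["mood"]: first-match association lookup; KeyError (none) is excluded by Pre_,
-- so under Pre_ the default "" is never used.
def pvMood (d : List (String × String)) : String :=
  ((d.find? (fun kv => kv.1 == "mood")).map (·.2)).getD ""

def detect_mood_trend_py (recent_moods : List (List (String × String))) : String :=
  if recent_moods.length < 3 then "insufficient_data"
  else
    let positive_moods := ["excited", "confident", "curious"]
    let negative_moods := ["frustrated", "tired", "anxious", "bored"]
    let mid_point := recent_moods.length / 2
    let first_half := PySem.List.slice recent_moods none (some (mid_point : Int))
    let second_half := PySem.List.slice recent_moods (some (mid_point : Int)) none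
    let first_positive : Int := first_half.countP (fun mood => positive_moods.contains (pvMood mood))
    let second_positive : Int := second_half.countP (fun mood => positive_moods.contains (pvMood mood))
    let first_negative : Int := first_half.countP (fun mood => negative_moods.contains (pvMood mood))
    let second_negative : Int := second_half.countP (fun mood => negative_moods.contains (pvMood mood))
    let positive_trend := second_positive - first_positive
    let negative_trend := second_negative - first_negative
    if positive_trend > 0 ∧ negative_trend ≤ 0 then "improving"
    else if negative_trend > 0 ∧ positive_trend ≤ 0 then "declining"
    else "stable"

-- ===== PORT B =====
def pvStep (mid : Nat) (acc : Int × Int) (p : Int × List (String × String)) : Int × Int :=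
  let m := pvMood p.2
  let sign : Int := if p.1 ≥ (mid : Int) then 1 else -1
  if (["excited", "confident", "curious"] : List String).contains m then (acc.1 + sign, acc.2)
  else if (["frustrated", "tired", "anxious", "bored"] : List String).contains m then (acc.1, acc.2 + sign)
  else acc

def detect_mood_trend_py_alt (recent_moods : List (List (String × String))) : String :=
  if recent_moods.length < 3 then "insufficient_data"
  else
    let mid_point := recent_moods.length / 2
    let trends := (PySem.List.enumerate recent_moods 0).foldl (pvStep mid_point) (0, 0)
    if trends.1 > 0 ∧ trends.2 ≤ 0 then "improving"
    else if trends.2 > 0 ∧ trends.1 ≤ 0 then "declining"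
    else "stable"

-- ===== PRECONDITION & SPEC =====
-- Pre_ excludes exactly the inputs where Python raises KeyError: a list of length ≥ 3
-- containing a dict without the key "mood".
def Pre_detect_mood_trend_py (recent_moods : List (List (String × String))) : Prop :=
  recent_moods.length < 3 ∨ ∀ d ∈ recent_moods, (d.find? (fun kv => kv.1 == "mood")).isSome
instance (recent_moods : List (List (String × String))) : Decidable (Pre_detect_mood_trend_py recent_moods) := by unfold Pre_detect_mood_trend_py; infer_instance

def pvWitness_detect_mood_trend_py : (List (List (String × String))) :=
  [[("mood", "excited")], [("mood", "tired")], [("mood", "curious")]]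

def Spec_detect_mood_trend_py (recent_moods : List (List (String × String))) (out : String) : Prop := out = detect_mood_trend_py_alt recent_moods
instance (recent_moods : List (List (String × String))) (out : String) : Decidable (Spec_detect_mood_trend_py recent_moods out) := by unfold Spec_detect_mood_trend_py; infer_instance

-- ===== CLAIM (what is proved, stated in full; the proofs are below) =====
def Claim_equal_detect_mood_trend_py : Prop := ∀ (recent_moods : List (List (String × String))), Dom_detect_mood_trend_py recent_moods → Pre_detect_mood_trend_py recent_moods → Spec_detect_mood_trend_py recent_moods (detect_mood_trend_py recent_moods)

-- ===== LEMMAS AND PROOFS =====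

-- On an enumerate segment whose indices all lie below mid, the fold subtracts the two counts.
theorem pvStep_foldl_low (mid : Nat) (ys : List (List (String × String))) :
    ∀ (k : Nat) (a b : Int), k + ys.length ≤ mid →
      (PySem.List.enumerate ys (k : Int)).foldl (pvStep mid) (a, b) =
        (a - (ys.countP (fun d => (["excited", "confident", "curious"] : List String).contains (pvMood d)) : Int),
         b - (ys.countP (fun d => (["frustrated", "tired", "anxious", "bored"] : List String).contains (pvMood d)) : Int)) := by
  induction ys with
  | nil => intro k a b _; simp [PySem.List.enumerate_nil]
  | cons y ys ih =>
    intro k a b hk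
    rw [PySem.List.enumerate_cons, List.foldl_cons]
    have hk1 : ((k : Int) + 1) = ((k + 1 : Nat) : Int) := by push_cast; ring
    have hlt : ¬ ((k : Int) ≥ (mid : Int)) := by
      simp only [List.length_cons] at hk; omega
    rw [hk1]
    have htail : k + 1 + ys.length ≤ mid := by simp only [List.length_cons] at hk; omega
    by_cases hp : pvMood y = "excited" ∨ pvMood y = "confident" ∨ pvMood y = "curious"
    · rw [show pvStep mid (a, b) ((k : Int), y) = (a + -1, b) by simp [pvStep, hp, hlt]]
      rw [ih (k + 1) (a + -1) b htail]
      rcases hp with h | h | h <;> simp [h, Prod.ext_iff] <;> omega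
    · by_cases hn : pvMood y = "frustrated" ∨ pvMood y = "tired" ∨ pvMood y = "anxious" ∨ pvMood y = "bored"
      · rw [show pvStep mid (a, b) ((k : Int), y) = (a, b + -1) by simp [pvStep, hp, hn, hlt]]
        rw [ih (k + 1) a (b + -1) htail]
        rcases hn with h | h | h | h <;> simp [h, Prod.ext_iff] <;> omega
      · rw [show pvStep mid (a, b) ((k : Int), y) = (a, b) by simp [pvStep, hp, hn, hlt]]
        rw [ih (k + 1) a b htail]
        simp [hp, hn]

-- On an enumerate segment whose indices all lie at or above mid, the fold adds the two counts.
theorem pvStep_foldl_high (mid : Nat) (ys : List (List (String × String))) :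
    ∀ (k : Nat) (a b : Int), mid ≤ k →
      (PySem.List.enumerate ys (k : Int)).foldl (pvStep mid) (a, b) =
        (a + (ys.countP (fun d => (["excited", "confident", "curious"] : List String).contains (pvMood d)) : Int),
         b + (ys.countP (fun d => (["frustrated", "tired", "anxious", "bored"] : List String).contains (pvMood d)) : Int)) := by
  induction ys with
  | nil => intro k a b _; simp [PySem.List.enumerate_nil]
  | cons y ys ih =>
    intro k a b hk
    rw [PySem.List.enumerate_cons, List.foldl_cons]
    have hk1 : ((k : Int) + 1) = ((k + 1 : Nat) : Int) := by push_cast; ring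
    have hge : ((k : Int) ≥ (mid : Int)) := by exact_mod_cast hk
    rw [hk1]
    by_cases hp : pvMood y = "excited" ∨ pvMood y = "confident" ∨ pvMood y = "curious"
    · rw [show pvStep mid (a, b) ((k : Int), y) = (a + 1, b) by simp [pvStep, hp, hge]]
      rw [ih (k + 1) (a + 1) b (by omega)]
      rcases hp with h | h | h <;> simp [h, Prod.ext_iff] <;> omega
    · by_cases hn : pvMood y = "frustrated" ∨ pvMood y = "tired" ∨ pvMood y = "anxious" ∨ pvMood y = "bored"
      · rw [show pvStep mid (a, b) ((k : Int), y) = (a, b + 1) by simp [pvStep, hp, hn, hge]]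
        rw [ih (k + 1) a (b + 1) (by omega)]
        rcases hn with h | h | h | h <;> simp [h, Prod.ext_iff] <;> omega
      · rw [show pvStep mid (a, b) ((k : Int), y) = (a, b) by simp [pvStep, hp, hn, hge]]
        rw [ih (k + 1) a b (by omega)]
        simp [hp, hn]

-- The fused pass over the whole list equals the two half-counts differences.
theorem pvTrends_eq (xs : List (List (String × String))) :
    (PySem.List.enumerate xs 0).foldl (pvStep (xs.length / 2)) (0, 0) =
      (((xs.drop (xs.length / 2)).countP (fun d => (["excited", "confident", "curious"] : List String).contains (pvMood d)) : Int)
         - ((xs.take (xs.length / 2)).countP (fun d => (["excited", "confident", "curious"] : List String).contains (pvMood d)) : Int),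
       ((xs.drop (xs.length / 2)).countP (fun d => (["frustrated", "tired", "anxious", "bored"] : List String).contains (pvMood d)) : Int)
         - ((xs.take (xs.length / 2)).countP (fun d => (["frustrated", "tired", "anxious", "bored"] : List String).contains (pvMood d)) : Int)) := by
  set mid := xs.length / 2 with hmid
  have hsplit : xs = xs.take mid ++ xs.drop mid := (List.take_append_drop mid xs).symm
  have hlen : (xs.take mid).length = mid := by
    rw [List.length_take]; omega
  calc (PySem.List.enumerate xs 0).foldl (pvStep mid) (0, 0)
      = (PySem.List.enumerate (xs.take mid ++ xs.drop mid) 0).foldl (pvStep mid) (0, 0) := by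
        rw [← hsplit]
    _ = (PySem.List.enumerate (xs.take mid) 0 ++ PySem.List.enumerate (xs.drop mid) (0 + (xs.take mid).length)).foldl (pvStep mid) (0, 0) := by
        rw [PySem.List.enumerate_append]
    _ = (PySem.List.enumerate (xs.drop mid) ((mid : Nat) : Int)).foldl (pvStep mid)
          ((PySem.List.enumerate (xs.take mid) ((0 : Nat) : Int)).foldl (pvStep mid) (0, 0)) := by
        rw [List.foldl_append, hlen]; norm_num
    _ = _ := by
        rw [pvStep_foldl_low mid (xs.take mid) 0 0 0 (by rw [hlen]; omega)]
        rw [pvStep_foldl_high mid (xs.drop mid) mid _ _ (le_refl mid)]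
        simp only [Prod.mk.injEq]
        constructor <;> ring

-- ===== VERDICT (by name: the statement is the Claim_ definition above) =====
theorem detect_mood_trend_py_spec : Claim_equal_detect_mood_trend_py := by
  intro xs _ _
  unfold Spec_detect_mood_trend_py detect_mood_trend_py detect_mood_trend_py_alt
  by_cases h3 : xs.length < 3
  · simp [h3]
  · simp only [h3, if_false]
    rw [pvTrends_eq xs]
    rw [PySem.List.slice_to_natCast, PySem.List.slice_from_natCast]
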